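-- pv_equiv track=rewrite | github.com/phillip-keldenich/sammy | scripts/feature_name_mapping_to_tuple_list.py | generate_tuples
-- ===== SOURCE A (Python) =====
-- import itertools
--
-- def canon_tuple(name1, val1, name2, val2):
--     if name1 < name2:
--         return (name1, val1, name2, val2)
--     elif name1 > name2:
--         return (name2, val2, name1, val1)
--     else:
--         raise RuntimeError("BUG: same name twice")
--
-- def generate_tuples(feature_name_mapping: list[dict[str, bool]]):
--     tuples: set[tuple[str, bool, str, bool]] = set()
--     for mapping in feature_name_mapping:
--         for name1, name2 in itertools.combinations(mapping.keys(), 2):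
--             val1 = mapping[name1]
--             val2 = mapping[name2]
--             tuples.add(canon_tuple(name1, val1, name2, val2))
--     return tuples
-- ===== SOURCE B (Python) =====
-- def generate_tuples(feature_name_mapping: list[dict[str, bool]]):
--     def pair_rows(items):
--         # recursion on the suffix: head's rows, then the rows of the remaining items
--         if len(items) < 2:
--             return []
--         head, rest = items[0], items[1:]
--         return [head + o if head < o else o + head for o in rest] + pair_rows(rest)
--
--     result = set()
--     for mapping in feature_name_mapping:
--         result.update(pair_rows(list(mapping.items())))
--     return result
-- ===== Notes on version B (the rewrite author's own statement) =====
-- stated objective: alternative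
-- what changed: B drops itertools.combinations over keys, the per-pair dict lookups and the three-branch canon_tuple helper (with its dead RuntimeError): it recurses on suffixes of the item list, builds each mapping's canonical rows as whole (name,value) items ordered by tuple comparison, and merges them into the set one mapping-batch at a time with set.update instead of per-pair set.add.
import Mathlib
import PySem

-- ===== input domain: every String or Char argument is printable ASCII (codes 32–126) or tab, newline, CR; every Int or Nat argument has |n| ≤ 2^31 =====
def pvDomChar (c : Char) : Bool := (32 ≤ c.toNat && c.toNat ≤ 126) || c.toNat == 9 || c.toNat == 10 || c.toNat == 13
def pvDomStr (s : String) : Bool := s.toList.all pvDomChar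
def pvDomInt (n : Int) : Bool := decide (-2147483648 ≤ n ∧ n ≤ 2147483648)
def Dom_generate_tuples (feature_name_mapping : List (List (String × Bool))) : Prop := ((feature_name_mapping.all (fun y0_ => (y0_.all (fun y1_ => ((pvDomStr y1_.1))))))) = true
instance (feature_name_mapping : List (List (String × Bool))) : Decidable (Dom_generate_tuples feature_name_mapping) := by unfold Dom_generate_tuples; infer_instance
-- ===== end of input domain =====

-- B: a recursive suffix pass over each mapping's item list (head paired with every later item),
-- ordering each pair by whole-item tuple comparison instead of A's canon_tuple helper (whose
-- RuntimeError branch is unreachable) and per-pair dict lookups, and merging each mapping's row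
-- batch with one set.update instead of per-pair set.add over itertools.combinations of the keys.


-- ===== PORT A =====
-- itertools.combinations(l, 2) in CPython order (used by A only)
def pvCombs2 {α : Type} : List α → List (α × α)
  | [] => []
  | x :: xs => xs.map (fun y => (x, y)) ++ pvCombs2 xs

def canon_tuple (name1 : String) (val1 : Bool) (name2 : String) (val2 : Bool) :
    String × Bool × String × Bool :=
  if name1 < name2 then (name1, val1, name2, val2)
  else if name2 < name1 then (name2, val2, name1, val1)
  else (name1, val1, name2, val2)
  -- last branch: Python raises RuntimeError("BUG: same name twice"); unreachable, since the only
  -- caller passes two distinct keys of one dict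

def generate_tuples (feature_name_mapping : List (List (String × Bool))) :
    List (String × Bool × String × Bool) :=
  feature_name_mapping.foldl (fun tuples mapping =>
    let d := PySem.Dict.ofList mapping
    (pvCombs2 (PySem.Dict.keys d)).foldl (fun tuples p =>
      let v1 := PySem.Dict.getD d p.1 false  -- mapping[name1]: key comes from keys(), always present
      let v2 := PySem.Dict.getD d p.2 false
      PySem.Set.add tuples (canon_tuple p.1 v1 p.2 v2)) tuples) PySem.Set.empty

-- ===== PORT B =====
-- Python '<' on (str, bool) tuples, lexicographic with False < True (hand port; exact on all inputs)
def pvTupLt (a b : String × Bool) : Bool :=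
  decide (a.1 < b.1) || (a.1 == b.1 && (!a.2 && b.2))

-- head + o if head < o else o + head
def pvRowOf (head other : String × Bool) : String × Bool × String × Bool :=
  if pvTupLt head other then (head.1, head.2, other.1, other.2)
  else (other.1, other.2, head.1, head.2)

def pvPairRows : List (String × Bool) → List (String × Bool × String × Bool)
  | [] => []
  | head :: rest =>
    if rest.isEmpty then []  -- len(items) < 2
    else rest.map (fun other => pvRowOf head other) ++ pvPairRows rest

def generate_tuples_alt (feature_name_mapping : List (List (String × Bool))) :
    List (String × Bool × String × Bool) :=
  feature_name_mapping.foldl (fun result mapping =>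
    PySem.Set.update result (pvPairRows (PySem.Dict.items (PySem.Dict.ofList mapping))))
    PySem.Set.empty

-- ===== PRECONDITION & SPEC =====
def Spec_generate_tuples (feature_name_mapping : List (List (String × Bool))) (out : List (String × Bool × String × Bool)) : Prop := out = generate_tuples_alt feature_name_mapping
instance (feature_name_mapping : List (List (String × Bool))) (out : List (String × Bool × String × Bool)) : Decidable (Spec_generate_tuples feature_name_mapping out) := by unfold Spec_generate_tuples; infer_instance

-- ===== CLAIM (what is proved, stated in full; the proofs are below) =====
def Claim_equal_generate_tuples : Prop := ∀ (feature_name_mapping : List (List (String × Bool))), Dom_generate_tuples feature_name_mapping → Spec_generate_tuples feature_name_mapping (generate_tuples feature_name_mapping)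

-- ===== LEMMAS AND PROOFS =====

-- a pair drawn by combinations is a (two-element) sublist of the source list
theorem pvCombs2_sublist {α : Type} (l : List α) (p : α × α) (hp : p ∈ pvCombs2 l) :
    [p.1, p.2].Sublist l := by
  induction l with
  | nil => simp [pvCombs2] at hp
  | cons x xs ih =>
    simp only [pvCombs2, List.mem_append, List.mem_map] at hp
    rcases hp with ⟨y, hy, rfl⟩ | hp
    · exact List.Sublist.cons₂ x (List.singleton_sublist.mpr hy)
    · exact (ih hp).cons x

theorem pvCombs2_map {α β : Type} (f : α → β) (l : List α) :
    pvCombs2 (l.map f) = (pvCombs2 l).map (fun p => (f p.1, f p.2)) := by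
  induction l with
  | nil => rfl
  | cons x xs ih => simp [pvCombs2, ih, List.map_map, Function.comp]

-- the tuple comparison agrees with canon_tuple on items with distinct names
theorem pvRowOf_eq_canon (a b : String × Bool) (hne : a.1 ≠ b.1) :
    pvRowOf a b = canon_tuple a.1 a.2 b.1 b.2 := by
  rcases lt_trichotomy a.1 b.1 with h | h | h
  · have ht : pvTupLt a b = true := by simp [pvTupLt, h]
    simp [pvRowOf, ht, canon_tuple, h]
  · exact absurd h hne
  · have hab : (a.1 == b.1) = false := beq_eq_false_iff_ne.mpr hne
    have ht : pvTupLt a b = false := by simp [pvTupLt, not_lt_of_gt h, hab]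
    simp [pvRowOf, ht, canon_tuple, not_lt_of_gt h, h]

-- the empty-rest guard is absorbed: the cons step always appends head's rows to the recursion
theorem pvPairRows_cons (x : String × Bool) (xs : List (String × Bool)) :
    pvPairRows (x :: xs) = xs.map (fun other => pvRowOf x other) ++ pvPairRows xs := by
  cases xs <;> simp [pvPairRows]

-- the recursive suffix pass emits exactly the combinations pairs, row by row, in the same order
theorem pvPairRows_eq (l : List (String × Bool)) :
    pvPairRows l = (pvCombs2 l).map (fun p => pvRowOf p.1 p.2) := by
  induction l with
  | nil => rfl
  | cons x xs ih =>
    simp [pvPairRows_cons, pvCombs2, ih, List.map_map, Function.comp]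

-- per mapping: A's canon rows over key pairs + lookups = B's recursive rows over the item list
theorem per_mapping_eq (m : List (String × Bool)) :
    (pvCombs2 (PySem.Dict.keys (PySem.Dict.ofList m))).map (fun p =>
        canon_tuple p.1 (PySem.Dict.getD (PySem.Dict.ofList m) p.1 false)
          p.2 (PySem.Dict.getD (PySem.Dict.ofList m) p.2 false)) =
    pvPairRows (PySem.Dict.items (PySem.Dict.ofList m)) := by
  set d := PySem.Dict.ofList m with hd
  have hkeys : PySem.Dict.keys d = (PySem.Dict.items d).map Prod.fst := by
    simp [PySem.Dict.keys]
  have hnd : (PySem.Dict.keys d).Nodup := PySem.Dict.nodup_keys_ofList m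
  rw [pvPairRows_eq, hkeys, pvCombs2_map, List.map_map]
  apply List.map_congr_left
  intro p hp
  have hsub := pvCombs2_sublist _ p hp
  have ha : p.1 ∈ PySem.Dict.items d := hsub.subset (by simp)
  have hb : p.2 ∈ PySem.Dict.items d := hsub.subset (by simp)
  have hnd' : ((PySem.Dict.items d).map Prod.fst).Nodup := by rwa [hkeys] at hnd
  have hne : p.1.1 ≠ p.2.1 := by
    have : [p.1.1, p.2.1].Sublist ((PySem.Dict.items d).map Prod.fst) := by
      simpa using hsub.map Prod.fst
    have := hnd'.sublist this
    simpa using (List.nodup_cons.mp this).1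
  have hv1 : PySem.Dict.getD d p.1.1 false = p.1.2 := by
    have := PySem.Dict.get?_of_mem_items d (by rw [← Prod.mk.eta (p := p.1)] at ha; exact ha) hnd
    simp [PySem.Dict.getD, this]
  have hv2 : PySem.Dict.getD d p.2.1 false = p.2.2 := by
    have := PySem.Dict.get?_of_mem_items d (by rw [← Prod.mk.eta (p := p.2)] at hb; exact hb) hnd
    simp [PySem.Dict.getD, this]
  simp only [Function.comp]
  rw [hv1, hv2]
  exact (pvRowOf_eq_canon p.1 p.2 hne).symm

-- ===== VERDICT (by name: the statement is the Claim_ definition above) =====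
theorem generate_tuples_spec : Claim_equal_generate_tuples := by
  intro fm _
  show generate_tuples fm = generate_tuples_alt fm
  unfold generate_tuples generate_tuples_alt
  apply PySem.List.foldl_congr_mem
  intro s m _
  rw [← per_mapping_eq m]
  simp only [PySem.Set.update, List.foldl_map]
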